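-- pv_equiv track=rewrite | github.com/SebastinSanty/ddcrp | ddcrp.py | get_linked
-- ===== SOURCE A (Python) =====
-- def get_linked(i,link):
--     c = []
--     q = []
--     q.append(i)
--     while q:
--         cur = q[0]
--         c.append(cur)
--         for k in range(0,len(link)):
--             if (link[k] == cur) and (k not in c) and (k not in q):
--                 q.append(k)
--         q = q[1:]
--     return c
-- ===== SOURCE B (Python) =====
-- def get_linked(i, link):
--     # Reverse-adjacency BFS: index the children of each node once, then BFS
--     # over that index with a visited set and a head-pointer queue instead of
--     # rescanning link and the c/q lists at every step.
--     adj = {}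
--     for k, v in enumerate(link):
--         adj.setdefault(v, []).append(k)
--     queue = [i]
--     visited = {i}
--     out = []
--     head = 0
--     while head < len(queue):
--         cur = queue[head]
--         head += 1
--         out.append(cur)
--         for k in adj.get(cur, []):
--             if k not in visited:
--                 visited.add(k)
--                 queue.append(k)
--     return out
-- ===== Notes on version B (the rewrite author's own statement) =====
-- stated objective: alternative
-- what changed: Replaces the per-node rescan of the whole link array with linear 'in' tests on c and q by a reverse-adjacency dict built once and a BFS over it with a visited set and a head-pointer queue.
import Mathlib
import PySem

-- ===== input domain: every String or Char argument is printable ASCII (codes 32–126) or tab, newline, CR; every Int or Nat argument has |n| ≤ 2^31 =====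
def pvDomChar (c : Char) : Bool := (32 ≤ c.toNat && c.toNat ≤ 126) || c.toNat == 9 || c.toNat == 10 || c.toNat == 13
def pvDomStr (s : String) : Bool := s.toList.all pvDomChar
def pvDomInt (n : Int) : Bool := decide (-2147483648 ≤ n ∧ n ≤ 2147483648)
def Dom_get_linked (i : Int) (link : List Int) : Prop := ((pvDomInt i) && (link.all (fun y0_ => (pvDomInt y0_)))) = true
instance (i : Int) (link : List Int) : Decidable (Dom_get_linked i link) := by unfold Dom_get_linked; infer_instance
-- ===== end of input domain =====

-- B replaces A's per-node rescan of link (with linear 'in' tests on c and q) by a reverse-adjacency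
-- dict built once plus a BFS with a visited set and a head-pointer queue; return values are equal.

-- ===== PORT A =====
-- while q: loop, ported with a fuel counter (link.length + 1 iterations always suffice:
-- each iteration moves a fresh element into c, and c holds distinct values from {i} ∪ range(len(link)));
-- fuel exhaustion returns the accumulated c, which the loop never reaches on real inputs.
def getLinkedLoopA (link : List Int) : Nat → List Int → List Int → List Int
  | 0, c, _ => c
  | fuel + 1, c, q =>
    match q with
    | [] => c
    | cur :: rest =>
      let c' := c ++ [cur]                     -- c.append(cur)
      let q' := (PySem.List.pyRange 0 link.length 1).foldl   -- for k in range(0, len(link)):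
          (fun acc k =>
            if (PySem.List.pyGetD link k 0 == cur) && !(c'.contains k) && !(acc.contains k)
            then acc ++ [k] else acc)          -- if link[k]==cur and k not in c and k not in q: q.append(k)
          (cur :: rest)
      getLinkedLoopA link fuel c' (q'.drop 1)  -- q = q[1:]

def get_linked (i : Int) (link : List Int) : List Int :=
  getLinkedLoopA link (link.length + 1) [] [i]

-- ===== PORT B =====
-- adj.setdefault(v, []).append(k) is exactly Dict.modify v [] (· ++ [k])
def getLinkedAdj (link : List Int) : PySem.Dict Int (List Int) :=
  (PySem.List.enumerate link 0).foldl
    (fun d p => d.modify p.2 [] (fun l => l ++ [p.1])) PySem.Dict.empty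

def getLinkedLoopB (adj : PySem.Dict Int (List Int)) :
    Nat → List Int → List Int → PySem.Set Int → Nat → List Int
  | 0, out, _, _, _ => out
  | fuel + 1, out, queue, visited, head =>
    if head < queue.length then
      let cur := PySem.List.pyGetD queue (head : Int) 0   -- cur = queue[head]
      let out' := out ++ [cur]                            -- out.append(cur)
      let st := (adj.getD cur []).foldl                   -- for k in adj.get(cur, []):
          (fun (st : List Int × PySem.Set Int) k =>
            if !(PySem.Set.contains st.2 k)               -- if k not in visited:
            then (st.1 ++ [k], PySem.Set.add st.2 k)      --   queue.append(k); visited.add(k)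
            else st)
          (queue, visited)
      getLinkedLoopB adj fuel out' st.1 st.2 (head + 1)
    else out

def get_linked_alt (i : Int) (link : List Int) : List Int :=
  getLinkedLoopB (getLinkedAdj link) (link.length + 1) [] [i] (PySem.Set.ofList [i]) 0

-- ===== PRECONDITION & SPEC =====
def Spec_get_linked (i : Int) (link : List Int) (out : List Int) : Prop := out = get_linked_alt i link
instance (i : Int) (link : List Int) (out : List Int) : Decidable (Spec_get_linked i link out) := by unfold Spec_get_linked; infer_instance

-- ===== CLAIM (what is proved, stated in full; the proofs are below) =====
def Claim_equal_get_linked : Prop := ∀ (i : Int) (link : List Int), Dom_get_linked i link → Spec_get_linked i link (get_linked i link)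

-- ===== LEMMAS AND PROOFS =====

-- A's self-referential push loop over a Nodup list is a plain filter against the initial queue.
lemma push_fold (g : Int → Bool) (l : List Int) (hl : l.Nodup) :
    ∀ q0 : List Int,
      l.foldl (fun acc k => if g k && !(acc.contains k) then acc ++ [k] else acc) q0
        = q0 ++ l.filter (fun k => g k && !(q0.contains k)) := by
  induction l with
  | nil => intro q0; simp
  | cons x t ih =>
    intro q0
    rcases List.nodup_cons.mp hl with ⟨hx, ht⟩
    by_cases hc : (g x && !(q0.contains x)) = true
    · have hfc : t.filter (fun k => g k && !((q0 ++ [x]).contains k))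
           = t.filter (fun k => g k && !(q0.contains k)) := by
        apply List.filter_congr
        intro k hk
        have hkx : k ≠ x := fun h => hx (h ▸ hk)
        simp [List.contains_eq_mem, hkx]
      rw [List.foldl_cons, if_pos hc, ih ht, hfc, List.filter_cons, if_pos hc]
      simp
    · rw [List.foldl_cons, if_neg hc, ih ht, List.filter_cons, if_neg hc]

-- B's inner loop, first component: newly pushed elements = filter against the initial visited set.
lemma contains_add_ne (vis : PySem.Set Int) (x k : Int) (h : k ≠ x) :
    (PySem.Set.add vis x).contains k = vis.contains k := by
  rw [PySem.Set.add_eq_ite]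
  split_ifs with h'
  · rfl
  · simp [List.contains_eq_mem, h]

lemma push_pair_fst (l : List Int) (hl : l.Nodup) :
    ∀ (q0 : List Int) (vis : PySem.Set Int),
      (l.foldl (fun (st : List Int × PySem.Set Int) k =>
          if !(PySem.Set.contains st.2 k) then (st.1 ++ [k], PySem.Set.add st.2 k) else st)
        (q0, vis)).1
        = q0 ++ l.filter (fun k => !(vis.contains k)) := by
  induction l with
  | nil => intro q0 vis; simp
  | cons x t ih =>
    intro q0 vis
    rcases List.nodup_cons.mp hl with ⟨hx, ht⟩
    by_cases hc : (PySem.Set.contains vis x) = true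
    · have hy : x ∈ vis := (PySem.Set.contains_iff (s := vis) (x := x)).mp hc
      rw [List.foldl_cons]
      show (List.foldl _ (if (!(PySem.Set.contains vis x)) = true
            then (q0 ++ [x], PySem.Set.add vis x) else (q0, vis)) t).1 = _
      rw [if_neg (by simp [hy]), ih ht, List.filter_cons, if_neg (by simp [hy])]
    · have hn : x ∉ vis := fun h => hc ((PySem.Set.contains_iff (s := vis) (x := x)).mpr h)
      rw [List.foldl_cons]
      show (List.foldl _ (if (!(PySem.Set.contains vis x)) = true
            then (q0 ++ [x], PySem.Set.add vis x) else (q0, vis)) t).1 = _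
      rw [if_pos (by simp [hn]), ih ht, List.filter_cons, if_pos (by simp [hn])]
      have hfc : t.filter (fun k => !((PySem.Set.add vis x).contains k))
           = t.filter (fun k => !(vis.contains k)) := by
        apply List.filter_congr
        intro k hk
        have hkx : k ≠ x := fun h => hx (h ▸ hk)
        rw [contains_add_ne vis x k hkx]
      rw [hfc]
      simp

-- B's inner loop, second component: membership in the new visited = old visited ∪ l.
lemma push_pair_snd_mem (l : List Int) :
    ∀ (q0 : List Int) (vis : PySem.Set Int) (x : Int),
      (x ∈ (l.foldl (fun (st : List Int × PySem.Set Int) k =>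
          if !(PySem.Set.contains st.2 k) then (st.1 ++ [k], PySem.Set.add st.2 k) else st)
        (q0, vis)).2) ↔ x ∈ vis ∨ x ∈ l := by
  induction l with
  | nil => intro q0 vis x; simp
  | cons y t ih =>
    intro q0 vis x
    by_cases hc : (PySem.Set.contains vis y) = true
    · have hy : y ∈ vis := (PySem.Set.contains_iff (s := vis) (x := y)).mp hc
      rw [List.foldl_cons]
      show (x ∈ (List.foldl _ (if (!(PySem.Set.contains vis y)) = true
            then (q0 ++ [y], PySem.Set.add vis y) else (q0, vis)) t).2) ↔ _
      rw [if_neg (by simp [hy]), ih]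
      simp only [List.mem_cons]
      constructor
      · rintro (h | h)
        · exact Or.inl h
        · exact Or.inr (Or.inr h)
      · rintro (h | h | h)
        · exact Or.inl h
        · exact Or.inl (h ▸ hy)
        · exact Or.inr h
    · rw [List.foldl_cons]
      show (x ∈ (List.foldl _ (if (!(PySem.Set.contains vis y)) = true
            then (q0 ++ [y], PySem.Set.add vis y) else (q0, vis)) t).2) ↔ _
      have hn : y ∉ vis := fun h => hc ((PySem.Set.contains_iff (s := vis) (x := y)).mpr h)
      rw [if_pos (by simp [hn]), ih, PySem.Set.mem_add]
      simp only [List.mem_cons]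
      tauto

-- The adjacency dict maps cur to exactly the indices k (in increasing order) with link[k] == cur.
lemma adj_getD (link : List Int) (cur : Int) :
    (getLinkedAdj link).getD cur []
      = (PySem.List.pyRange 0 link.length 1).filter
          (fun k => PySem.List.pyGetD link k 0 == cur) := by
  unfold getLinkedAdj
  rw [PySem.List.enumerate_eq_map_pyRange (d := 0), List.foldl_map]
  simp only [PySem.List.len_eq]
  have h1 : (PySem.List.pyRange 0 (link.length : Int) 1).foldl
      (fun d j => d.modify (j, PySem.List.pyGetD link j 0).2 [] (fun l => l ++ [(j, PySem.List.pyGetD link j 0).1]))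
      PySem.Dict.empty
      = ((PySem.List.pyRange 0 (link.length : Int) 1).map
          (fun j => (PySem.List.pyGetD link j 0, j))).foldl
          (fun d p => d.modify p.1 [] (fun l => l ++ [p.2])) PySem.Dict.empty := by
    rw [List.foldl_map]
  rw [h1, PySem.Dict.getD_foldl_modify_append]
  rw [List.filter_map]
  simp only [List.map_map]
  have h2 : ((PySem.List.pyRange 0 (link.length : Int) 1).filter
      ((fun p : Int × Int => p.1 == cur) ∘ fun j => (PySem.List.pyGetD link j 0, j)))
      = (PySem.List.pyRange 0 (link.length : Int) 1).filter
          (fun k => PySem.List.pyGetD link k 0 == cur) := rfl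
  rw [h2]
  simp [Function.comp_def]

-- Core loop correspondence: same fuel, related states ⇒ same result.
lemma loop_eq (link : List Int) :
    ∀ (fuel : Nat) (c q : List Int) (visited : PySem.Set Int),
      (∀ x : Int, x ∈ visited ↔ x ∈ c ++ q) →
      getLinkedLoopA link fuel c q
        = getLinkedLoopB (getLinkedAdj link) fuel c (c ++ q) visited c.length := by
  intro fuel
  induction fuel with
  | zero => intro c q visited _; rfl
  | succ fuel ih =>
    intro c q visited hvis
    cases q with
    | nil =>
      simp [getLinkedLoopA, getLinkedLoopB]
    | cons cur rest =>
      have hlt : c.length < (c ++ cur :: rest).length := by simp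
      have hcur : PySem.List.pyGetD (c ++ cur :: rest) (c.length : Int) 0 = cur := by
        rw [PySem.List.pyGetD_natCast]
        simp [List.getD]
      -- A's pushed elements
      have hrangeNodup := PySem.List.nodup_pyRange_one (a := 0) (b := (link.length : Int))
      have hA := push_fold
          (fun k => (PySem.List.pyGetD link k 0 == cur) && !((c ++ [cur]).contains k))
          (PySem.List.pyRange 0 link.length 1) hrangeNodup (cur :: rest)
      -- B's inner fold
      have hadjNodup : ((getLinkedAdj link).getD cur []).Nodup := by
        rw [adj_getD]; exact hrangeNodup.filter _
      have hB1 := push_pair_fst ((getLinkedAdj link).getD cur []) hadjNodup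
          (c ++ cur :: rest) visited
      have hB2 := push_pair_snd_mem ((getLinkedAdj link).getD cur [])
          (c ++ cur :: rest) visited
      -- the two pushed lists coincide
      have hfilt :
          ((getLinkedAdj link).getD cur []).filter (fun k => !(visited.contains k))
            = (PySem.List.pyRange 0 link.length 1).filter
                (fun k => ((PySem.List.pyGetD link k 0 == cur) && !((c ++ [cur]).contains k)) && !((cur :: rest).contains k)) := by
        rw [adj_getD, List.filter_filter]
        apply List.filter_congr
        intro k _
        by_cases hlk : (PySem.List.pyGetD link k 0 == cur) = true
        · simp only [hlk, Bool.true_and]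
          have : (visited.contains k) = ((c ++ [cur]).contains k || (cur :: rest).contains k) := by
            by_cases hm : k ∈ visited
            · have := (hvis k).mp hm
              have hk' : k ∈ c ∨ k = cur ∨ k ∈ rest := by simpa using this
              have hvc : visited.contains k = true := by
                simp [List.contains_eq_mem, hm]
              rw [hvc]
              rcases hk' with h | h | h <;>
                simp [List.contains_eq_mem, h]
            · have hk' : ¬ (k ∈ c ∨ k = cur ∨ k ∈ rest) := by
                intro h; apply hm; rw [hvis k]; simpa using h
              push Not at hk'
              have hvc : visited.contains k = false := by
                simp [List.contains_eq_mem, hm]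
              rw [hvc]
              simp [List.contains_eq_mem, hk'.1, hk'.2.1, hk'.2.2]
          rw [this]
          cases h1 : (c ++ [cur]).contains k <;> cases h2 : (cur :: rest).contains k <;> simp
        · simp [eq_false_of_ne_true hlk]
      -- unfold one step of each loop
      show getLinkedLoopA link (fuel + 1) c (cur :: rest)
            = getLinkedLoopB (getLinkedAdj link) (fuel + 1) c (c ++ cur :: rest) visited c.length
      rw [getLinkedLoopA, getLinkedLoopB]
      rw [if_pos hlt]
      simp only [hcur, hA, hB1]
      set pushed := (PySem.List.pyRange 0 link.length 1).filter
          (fun k => ((PySem.List.pyGetD link k 0 == cur) && !((c ++ [cur]).contains k)) && !((cur :: rest).contains k)) with hpushed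
      have hdrop : ((cur :: rest) ++ pushed).drop 1 = rest ++ pushed := by simp
      rw [hdrop]
      have hq : (c ++ cur :: rest) ++ ((getLinkedAdj link).getD cur []).filter (fun k => !(visited.contains k))
              = (c ++ [cur]) ++ (rest ++ pushed) := by
        rw [hfilt]; simp
      have hlen : c.length + 1 = (c ++ [cur]).length := by simp
      rw [hq, hlen]
      apply ih
      intro x
      rw [hB2, hvis x]
      have hpm : x ∈ pushed → x ∈ (getLinkedAdj link).getD cur [] := by
        intro h; rw [← hfilt] at h; exact List.mem_of_mem_filter h
      have hadjm : x ∈ (getLinkedAdj link).getD cur [] → x ∈ pushed ∨ x ∈ visited := by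
        intro h
        by_cases hv : x ∈ visited
        · exact Or.inr hv
        · left; rw [← hfilt]
          exact List.mem_filter.mpr ⟨h, by simp [List.contains_eq_mem, hv]⟩
      constructor
      · rintro (h | h)
        · simp only [List.mem_append, List.mem_cons] at h ⊢
          tauto
        · rcases hadjm h with h' | h'
          · simp only [List.mem_append]
            tauto
          · have hx := (hvis x).mp h'
            simp only [List.mem_append, List.mem_cons] at hx ⊢
            tauto
      · intro h
        simp only [List.mem_append, List.mem_cons] at h
        rcases h with (h | h | h) | h | h
        · left; simp [h]
        · left; simp [h]
        · simp at h
        · left; simp [h]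
        · exact Or.inr (hpm h)

-- ===== VERDICT (by name: the statement is the Claim_ definition above) =====
theorem get_linked_spec : Claim_equal_get_linked := by
  intro i link _
  unfold Spec_get_linked get_linked get_linked_alt
  have h := loop_eq link (link.length + 1) [] [i] (PySem.Set.ofList [i])
      (by intro x; simp [PySem.Set.mem_ofList])
  simpa using h
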